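-- pv_equiv track=rewrite | github.com/samhotchkiss/promptmaster | src/pollypm/supervisor.py | _primary_failure
-- ===== SOURCE A (Python) =====
-- def _primary_failure(alerts: list[str]) -> str | None:
--     for alert_type in [
--         "auth_broken",
--         "capacity_exhausted",
--         "provider_outage",
--         "pane_dead",
--         "shell_returned",
--         "missing_window",
--         # Proactive: rolled over before the hard capacity cutoff.
--         "capacity_low",
--     ]:
--         if alert_type in alerts:
--             return alert_type
--     return None
-- ===== SOURCE B (Python) =====
-- def _primary_failure(alerts: list[str]) -> str | None:
--     rank = {t: i for i, t in enumerate([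
--         "auth_broken",
--         "capacity_exhausted",
--         "provider_outage",
--         "pane_dead",
--         "shell_returned",
--         "missing_window",
--         "capacity_low",
--     ])}
--     best = None
--     best_rank = 8
--     for alert in alerts:
--         r = rank.get(alert)
--         if r is not None and r < best_rank:
--             best = alert
--             best_rank = r
--     return best
-- ===== Notes on version B (the rewrite author's own statement) =====
-- stated objective: idiomatic
-- what changed: Replaces the loop over the fixed priority list with repeated membership scans of alerts by a rank dictionary and a single pass over alerts tracking the element of smallest rank.
import Mathlib
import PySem

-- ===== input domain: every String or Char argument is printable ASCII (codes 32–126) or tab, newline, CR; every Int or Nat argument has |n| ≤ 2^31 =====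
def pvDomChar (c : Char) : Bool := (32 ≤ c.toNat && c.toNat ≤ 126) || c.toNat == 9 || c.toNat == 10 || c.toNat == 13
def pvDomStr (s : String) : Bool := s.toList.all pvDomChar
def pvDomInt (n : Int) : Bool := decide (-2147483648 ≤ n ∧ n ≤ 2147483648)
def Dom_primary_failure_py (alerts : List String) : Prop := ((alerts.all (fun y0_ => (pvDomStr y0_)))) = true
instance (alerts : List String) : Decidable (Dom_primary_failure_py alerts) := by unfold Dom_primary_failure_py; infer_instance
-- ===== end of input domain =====

-- B replaces A's loop over the fixed priority list (with a membership scan of alerts per type)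
-- by a rank dictionary and a single pass over alerts tracking the known element of smallest rank (idiomatic).


-- ===== PORT A =====
-- the loop 'for alert_type in [...]: if alert_type in alerts: return alert_type'
def pfLoopA : List String → List String → Option String
  | [], _ => none
  | p :: ps, alerts => if alerts.contains p then some p else pfLoopA ps alerts

def primary_failure_py (alerts : List String) : Option String :=
  pfLoopA ["auth_broken", "capacity_exhausted", "provider_outage", "pane_dead",
           "shell_returned", "missing_window", "capacity_low"] alerts

-- ===== PORT B =====
-- rank = {t: i for i, t in enumerate([...])}
def pfRankDict : PySem.Dict String Int :=
  (PySem.List.enumerate ["auth_broken", "capacity_exhausted", "provider_outage", "pane_dead",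
                         "shell_returned", "missing_window", "capacity_low"]).foldl
    (fun d it => PySem.Dict.insert d it.2 it.1) PySem.Dict.empty

def primary_failure_py_alt (alerts : List String) : Option String :=
  (alerts.foldl
    (fun st alert =>
      match PySem.Dict.get? pfRankDict alert with
      | some r => if r < st.2 then (some alert, r) else st
      | none => st)
    ((none : Option String), (8 : Int))).1

-- ===== PRECONDITION & SPEC =====
def Spec_primary_failure_py (alerts : List String) (out : Option String) : Prop := out = primary_failure_py_alt alerts
instance (alerts : List String) (out : Option String) : Decidable (Spec_primary_failure_py alerts out) := by unfold Spec_primary_failure_py; infer_instance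

-- ===== CLAIM (what is proved, stated in full; the proofs are below) =====
def Claim_equal_primary_failure_py : Prop := ∀ (alerts : List String), Dom_primary_failure_py alerts → Spec_primary_failure_py alerts (primary_failure_py alerts)

-- ===== LEMMAS AND PROOFS =====

-- rank of a string, 8 for unknown
def pfR (a : String) : Int := (PySem.Dict.get? pfRankDict a).getD 8

-- minimum rank present in the list (8 if none)
def pfMin (l : List String) : Int := l.foldr (fun a m => min (pfR a) m) 8

-- the alert type of a given rank
def pfPick (i : Int) : Option String :=
  if i = 0 then some "auth_broken" else if i = 1 then some "capacity_exhausted"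
  else if i = 2 then some "provider_outage" else if i = 3 then some "pane_dead"
  else if i = 4 then some "shell_returned" else if i = 5 then some "missing_window"
  else if i = 6 then some "capacity_low" else none

lemma pfRankDict_eq : pfRankDict = PySem.Dict.mk
    [("auth_broken", 0), ("capacity_exhausted", 1), ("provider_outage", 2), ("pane_dead", 3),
     ("shell_returned", 4), ("missing_window", 5), ("capacity_low", 6)] := by decide

lemma pfR_eq (a : String) : pfR a =
    if "auth_broken" = a then 0 else if "capacity_exhausted" = a then 1
    else if "provider_outage" = a then 2 else if "pane_dead" = a then 3
    else if "shell_returned" = a then 4 else if "missing_window" = a then 5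
    else if "capacity_low" = a then 6 else 8 := by
  simp only [pfR, pfRankDict_eq, PySem.Dict.get?_mk_cons, beq_iff_eq]
  split_ifs <;> rfl

lemma pfR_range (a : String) : (0 ≤ pfR a ∧ pfR a ≤ 6) ∨ pfR a = 8 := by
  rw [pfR_eq]; split_ifs <;> omega

lemma pfR_pick (a : String) (i : Int) (h : pfR a = i) (h8 : i ≠ 8) : pfPick i = some a := by
  rw [pfR_eq] at h
  split_ifs at h <;> subst h <;> simp_all [pfPick]

lemma pfMin_nil : pfMin [] = 8 := rfl

lemma pfMin_cons (x : String) (t : List String) : pfMin (x :: t) = min (pfR x) (pfMin t) := rfl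

lemma pfMin_le (l : List String) (a : String) (h : a ∈ l) : pfMin l ≤ pfR a := by
  induction l with
  | nil => cases h
  | cons x t ih =>
    rw [pfMin_cons]
    rcases List.mem_cons.mp h with h | h
    · subst h; omega
    · have := ih h; omega

lemma pfMin_attain (l : List String) (h : pfMin l ≠ 8) : ∃ a ∈ l, pfR a = pfMin l := by
  induction l with
  | nil => exact absurd pfMin_nil h
  | cons x t ih =>
    rw [pfMin_cons] at h ⊢
    by_cases hx : pfR x ≤ pfMin t
    · exact ⟨x, by simp, by omega⟩
    · obtain ⟨a, ha, hr⟩ := ih (by omega)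
      exact ⟨a, List.mem_cons_of_mem _ ha, by omega⟩

lemma pfMin_range (l : List String) : (0 ≤ pfMin l ∧ pfMin l ≤ 6) ∨ pfMin l = 8 := by
  induction l with
  | nil => right; exact pfMin_nil
  | cons x t ih =>
    rw [pfMin_cons]
    have := pfR_range x
    omega

lemma not_mem_of_lt (l : List String) (a : String) (h : pfR a < pfMin l) :
    a ∉ l := fun hmem => absurd (pfMin_le l a hmem) (by omega)

-- B's fold computes pfPick of the running minimum
lemma foldB (l : List String) (b : Option String) (R : Int)
    (hb : b = pfPick R) (hR : (0 ≤ R ∧ R ≤ 6) ∨ R = 8) :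
    (l.foldl
      (fun st alert =>
        match PySem.Dict.get? pfRankDict alert with
        | some r => if r < st.2 then (some alert, r) else st
        | none => st)
      (b, R)).1 = pfPick (min R (pfMin l)) := by
  induction l generalizing b R with
  | nil =>
    simp only [List.foldl, pfMin_nil]
    rw [hb]; congr 1; omega
  | cons x t ih =>
    have hx := pfR_range x
    simp only [List.foldl]
    have hget : (match PySem.Dict.get? pfRankDict x with
        | some r => if r < R then (some x, r) else (b, R)
        | none => (b, R)) = if pfR x < R then (some x, pfR x) else (b, R) := by
      unfold pfR
      cases hg : PySem.Dict.get? pfRankDict x with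
      | none =>
        simp only [Option.getD_none]
        rw [if_neg (by omega)]
      | some r => simp only [Option.getD_some]
    rw [hget]
    by_cases hlt : pfR x < R
    · rw [if_pos hlt]
      rw [ih _ _ (pfR_pick x _ rfl (by omega)).symm (by omega)]
      rw [pfMin_cons]
      congr 1; omega
    · rw [if_neg hlt]
      rw [ih _ _ hb hR]
      rw [pfMin_cons]
      congr 1; omega

lemma altB (l : List String) : primary_failure_py_alt l = pfPick (pfMin l) := by
  unfold primary_failure_py_alt
  rw [foldB l none 8 (by simp [pfPick]) (Or.inr rfl)]
  have := pfMin_range l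
  congr 1; omega

-- A returns pfPick of the minimum too
lemma aEq (l : List String) : primary_failure_py l = pfPick (pfMin l) := by
  rcases pfMin_range l with ⟨h0, h6⟩ | h8
  · obtain ⟨a, ha, hra⟩ := pfMin_attain l (by omega)
    have hpick := pfR_pick a _ hra (by omega)
    have hcases : pfMin l = 0 ∨ pfMin l = 1 ∨ pfMin l = 2 ∨ pfMin l = 3 ∨
        pfMin l = 4 ∨ pfMin l = 5 ∨ pfMin l = 6 := by omega
    rcases hcases with h | h | h | h | h | h | h
    · rw [h] at hpick; simp [pfPick] at hpick; subst hpick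
      rw [h]; simp [primary_failure_py, pfLoopA, ha, pfPick]
    · rw [h] at hpick; simp [pfPick] at hpick; subst hpick
      have c0 : "auth_broken" ∉ l :=
        not_mem_of_lt l _ (by rw [pfR_eq, h]; decide)
      rw [h]; simp [primary_failure_py, pfLoopA, ha, c0, pfPick]
    · rw [h] at hpick; simp [pfPick] at hpick; subst hpick
      have c0 : "auth_broken" ∉ l :=
        not_mem_of_lt l _ (by rw [pfR_eq, h]; decide)
      have c1 : "capacity_exhausted" ∉ l :=
        not_mem_of_lt l _ (by rw [pfR_eq, h]; decide)
      rw [h]; simp [primary_failure_py, pfLoopA, ha, c0, c1, pfPick]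
    · rw [h] at hpick; simp [pfPick] at hpick; subst hpick
      have c0 : "auth_broken" ∉ l :=
        not_mem_of_lt l _ (by rw [pfR_eq, h]; decide)
      have c1 : "capacity_exhausted" ∉ l :=
        not_mem_of_lt l _ (by rw [pfR_eq, h]; decide)
      have c2 : "provider_outage" ∉ l :=
        not_mem_of_lt l _ (by rw [pfR_eq, h]; decide)
      rw [h]; simp [primary_failure_py, pfLoopA, ha, c0, c1, c2, pfPick]
    · rw [h] at hpick; simp [pfPick] at hpick; subst hpick
      have c0 : "auth_broken" ∉ l :=
        not_mem_of_lt l _ (by rw [pfR_eq, h]; decide)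
      have c1 : "capacity_exhausted" ∉ l :=
        not_mem_of_lt l _ (by rw [pfR_eq, h]; decide)
      have c2 : "provider_outage" ∉ l :=
        not_mem_of_lt l _ (by rw [pfR_eq, h]; decide)
      have c3 : "pane_dead" ∉ l :=
        not_mem_of_lt l _ (by rw [pfR_eq, h]; decide)
      rw [h]; simp [primary_failure_py, pfLoopA, ha, c0, c1, c2, c3, pfPick]
    · rw [h] at hpick; simp [pfPick] at hpick; subst hpick
      have c0 : "auth_broken" ∉ l :=
        not_mem_of_lt l _ (by rw [pfR_eq, h]; decide)
      have c1 : "capacity_exhausted" ∉ l :=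
        not_mem_of_lt l _ (by rw [pfR_eq, h]; decide)
      have c2 : "provider_outage" ∉ l :=
        not_mem_of_lt l _ (by rw [pfR_eq, h]; decide)
      have c3 : "pane_dead" ∉ l :=
        not_mem_of_lt l _ (by rw [pfR_eq, h]; decide)
      have c4 : "shell_returned" ∉ l :=
        not_mem_of_lt l _ (by rw [pfR_eq, h]; decide)
      rw [h]; simp [primary_failure_py, pfLoopA, ha, c0, c1, c2, c3, c4, pfPick]
    · rw [h] at hpick; simp [pfPick] at hpick; subst hpick
      have c0 : "auth_broken" ∉ l :=
        not_mem_of_lt l _ (by rw [pfR_eq, h]; decide)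
      have c1 : "capacity_exhausted" ∉ l :=
        not_mem_of_lt l _ (by rw [pfR_eq, h]; decide)
      have c2 : "provider_outage" ∉ l :=
        not_mem_of_lt l _ (by rw [pfR_eq, h]; decide)
      have c3 : "pane_dead" ∉ l :=
        not_mem_of_lt l _ (by rw [pfR_eq, h]; decide)
      have c4 : "shell_returned" ∉ l :=
        not_mem_of_lt l _ (by rw [pfR_eq, h]; decide)
      have c5 : "missing_window" ∉ l :=
        not_mem_of_lt l _ (by rw [pfR_eq, h]; decide)
      rw [h]; simp [primary_failure_py, pfLoopA, ha, c0, c1, c2, c3, c4, c5, pfPick]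
  · have hall : ∀ a : String, pfR a ≠ 8 → a ∉ l := by
      intro a hne
      apply not_mem_of_lt
      have := pfR_range a; omega
    have c0 := hall "auth_broken" (by rw [pfR_eq]; decide)
    have c1 := hall "capacity_exhausted" (by rw [pfR_eq]; decide)
    have c2 := hall "provider_outage" (by rw [pfR_eq]; decide)
    have c3 := hall "pane_dead" (by rw [pfR_eq]; decide)
    have c4 := hall "shell_returned" (by rw [pfR_eq]; decide)
    have c5 := hall "missing_window" (by rw [pfR_eq]; decide)
    have c6 := hall "capacity_low" (by rw [pfR_eq]; decide)
    rw [h8]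
    simp [primary_failure_py, pfLoopA, c0, c1, c2, c3, c4, c5, c6, pfPick]

-- ===== VERDICT (by name: the statement is the Claim_ definition above) =====
theorem primary_failure_py_spec : Claim_equal_primary_failure_py := by
  intro alerts _
  unfold Spec_primary_failure_py
  rw [aEq, altB]
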